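-- pv_equiv track=rewrite | github.com/Zenor27/naptaled | src/display_whos_that_pokemon.py | image_pixel_by_pixel
-- ===== SOURCE A (Python) =====
-- from typing import Iterable, Optional
--
-- def image_pixel_by_pixel(image_pixels: list[tuple[int, int, int]]) -> Iterable[list[tuple[int, int, int]]]:
--     image_pixel_len = len(image_pixels)
--     black_mask = [(0, 0, 0)] * image_pixel_len
--     new_pixels = []
--
--     non_white_count = 0
--
--     for i in range(image_pixel_len):
--         pixel = image_pixels[i]
--         new_pixels.append(pixel)  # Add the pixel to the list
--
--         if pixel != (255, 255, 255):  # Check if the pixel is not white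
--             non_white_count += 1
--
--             if non_white_count % 5 == 0:
--                 # Add remaining black pixels to complete the image
--                 completed_image = new_pixels + black_mask[len(new_pixels) :]
--                 yield completed_image
--                 non_white_count = 0
--
--     yield image_pixels
-- ===== SOURCE B (Python) =====
-- from typing import Iterable
--
--
-- def image_pixel_by_pixel(image_pixels: list[tuple[int, int, int]]) -> Iterable[list[tuple[int, int, int]]]:
--     # Pass 1: find the reveal boundaries (prefix length after every 5th non-white pixel).
--     cuts = []
--     count = 0
--     for i, pixel in enumerate(image_pixels):
--         if pixel != (255, 255, 255):
--             count += 1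
--             if count % 5 == 0:
--                 cuts.append(i + 1)
--                 count = 0
--     # Pass 2: materialize one frame per boundary, then the full image.
--     n = len(image_pixels)
--     for c in cuts:
--         yield image_pixels[:c] + [(0, 0, 0)] * (n - c)
--     yield image_pixels
-- ===== Notes on version B (the rewrite author's own statement) =====
-- stated objective: alternative
-- what changed: Replaced the interleaved accumulate-and-emit loop (which grows a prefix list and pads it with a precomputed black mask at each yield) by a two-pass decomposition: a first pass collects only the reveal boundary indices, a second pass materializes each frame from a slice plus black padding.
import Mathlib
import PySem

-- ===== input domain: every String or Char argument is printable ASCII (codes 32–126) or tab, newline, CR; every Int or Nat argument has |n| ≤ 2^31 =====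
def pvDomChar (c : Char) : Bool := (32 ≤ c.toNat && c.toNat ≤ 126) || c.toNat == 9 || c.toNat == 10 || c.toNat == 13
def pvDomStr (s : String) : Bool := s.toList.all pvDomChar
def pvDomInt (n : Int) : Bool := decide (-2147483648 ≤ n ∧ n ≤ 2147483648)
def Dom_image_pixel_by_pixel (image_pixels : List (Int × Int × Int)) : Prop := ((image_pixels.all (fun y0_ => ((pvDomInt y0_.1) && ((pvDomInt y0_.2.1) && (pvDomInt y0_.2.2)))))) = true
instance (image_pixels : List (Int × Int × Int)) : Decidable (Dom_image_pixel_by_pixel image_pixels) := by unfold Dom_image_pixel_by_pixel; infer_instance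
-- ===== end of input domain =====

-- B replaces A's interleaved accumulate-and-emit loop by a two-pass decomposition
-- (collect reveal boundaries, then materialize each frame); objective: alternative.

-- ===== PORT A =====
-- A's generator loop: walks the pixels keeping the accumulated prefix `new_pixels`
-- and the running (reset-on-yield) non-white count; at every 5th non-white pixel
-- it yields the prefix padded by the tail of the black mask.  The final
-- `yield image_pixels` is appended after the loop.
def pvGoA (rest : List (Int × Int × Int)) (new_pixels : List (Int × Int × Int))
    (non_white_count : Int) (total : Nat) : List (List (Int × Int × Int)) :=
  match rest with
  | [] => []
  | pixel :: rs =>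
    let new_pixels' := new_pixels ++ [pixel]
    if pixel ≠ (255, 255, 255) then
      let c := non_white_count + 1
      if c % 5 == 0 then
        (new_pixels' ++ List.replicate (total - new_pixels'.length) (0, 0, 0))
          :: pvGoA rs new_pixels' 0 total
      else pvGoA rs new_pixels' c total
    else pvGoA rs new_pixels' non_white_count total

def image_pixel_by_pixel (image_pixels : List (Int × Int × Int)) : List (List (Int × Int × Int)) :=
  pvGoA image_pixels [] 0 image_pixels.length ++ [image_pixels]

-- ===== PORT B =====
-- Pass 1: collect the cut indices i+1 at every 5th non-white pixel.
def pvCuts (rest : List (Int × Int × Int)) (i : Nat) (count : Int) : List Nat :=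
  match rest with
  | [] => []
  | pixel :: rs =>
    if pixel ≠ (255, 255, 255) then
      let c := count + 1
      if c % 5 == 0 then (i + 1) :: pvCuts rs (i + 1) 0
      else pvCuts rs (i + 1) c
    else pvCuts rs (i + 1) count

-- Pass 2: one frame per cut (slice image_pixels[:c] is List.take c, exact since 0 ≤ c),
-- then the full image.
def image_pixel_by_pixel_alt (image_pixels : List (Int × Int × Int)) : List (List (Int × Int × Int)) :=
  (pvCuts image_pixels 0 0).map
    (fun c => image_pixels.take c ++ List.replicate (image_pixels.length - c) (0, 0, 0))
    ++ [image_pixels]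

-- ===== PRECONDITION & SPEC =====
def Spec_image_pixel_by_pixel (image_pixels : List (Int × Int × Int)) (out : List (List (Int × Int × Int))) : Prop := out = image_pixel_by_pixel_alt image_pixels
instance (image_pixels : List (Int × Int × Int)) (out : List (List (Int × Int × Int))) : Decidable (Spec_image_pixel_by_pixel image_pixels out) := by unfold Spec_image_pixel_by_pixel; infer_instance

-- ===== CLAIM (what is proved, stated in full; the proofs are below) =====
def Claim_equal_image_pixel_by_pixel : Prop := ∀ (image_pixels : List (Int × Int × Int)), Dom_image_pixel_by_pixel image_pixels → Spec_image_pixel_by_pixel image_pixels (image_pixel_by_pixel image_pixels)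

-- ===== LEMMAS AND PROOFS =====

-- Loop invariant: when A's loop has consumed the prefix `pre` (so new_pixels = pre),
-- the frames it still emits are exactly the frames B builds from the remaining cuts.
theorem pvGoA_eq_cuts (rest : List (Int × Int × Int)) :
    ∀ (pre : List (Int × Int × Int)) (cnt : Int),
      pvGoA rest pre cnt (pre ++ rest).length =
        (pvCuts rest pre.length cnt).map
          (fun c => (pre ++ rest).take c
              ++ List.replicate ((pre ++ rest).length - c) (0, 0, 0)) := by
  induction rest with
  | nil => intro pre cnt; simp [pvGoA, pvCuts]
  | cons pixel rs ih =>
    intro pre cnt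
    have hpx : pre ++ pixel :: rs = (pre ++ [pixel]) ++ rs := by simp
    have htake : ((pre ++ [pixel]) ++ rs).take (pre.length + 1) = pre ++ [pixel] := by
      have := List.take_left (l₁ := pre ++ [pixel]) (l₂ := rs)
      simpa using this
    simp only [pvGoA, pvCuts]
    split_ifs with h1 h2
    · -- non-white, count hits multiple of 5: emit a frame
      have hih := ih (pre ++ [pixel]) 0
      rw [hpx]
      simp only [List.map_cons]
      rw [htake, hih]
      simp
    · have hih := ih (pre ++ [pixel]) (cnt + 1)
      rw [hpx]; simpa using hih
    · have hih := ih (pre ++ [pixel]) cnt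
      rw [hpx]; simpa using hih

-- ===== VERDICT (by name: the statement is the Claim_ definition above) =====
theorem image_pixel_by_pixel_spec : Claim_equal_image_pixel_by_pixel := by
  intro image_pixels _
  show _ = _
  unfold image_pixel_by_pixel image_pixel_by_pixel_alt
  have := pvGoA_eq_cuts image_pixels [] 0
  simpa using this
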